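-- pv_equiv track=rewrite | github.com/hui-lun/BDM-chat | backend/app/graph/tools/spec/spec_analyze.py | clean_server_name
-- ===== SOURCE A (Python) =====
-- op_mapping = {
--     '$regex': 'contains',
--     '$gte': 'greater than or equal to',
--     '$gt': 'greater than',
--     '$lte': 'less than or equal to',
--     '$lt': 'less than',
--     '$ne': 'not equal to',
--     '$eq': 'equal to',
--     '$in': 'in list',
--     '$nin': 'not in list',
--     '$exists': 'exists',
--     '$not': 'does not match condition',
-- }
--
-- def clean_server_name(condition,data_list):
--     response = "The following project models meet the specified criteria:\n"
--     for i, cond in enumerate(condition, 1):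
--         response += f"Condition #{i}: {condition_to_str(cond)}\n"
--     response += "Below are the machines that satisfy each condition combination:\n"
--
--     for cond_combo, models in sorted(data_list.items(), key=lambda x: (-len(x[0]), x[0])):
--         cond_str = " + ".join(cond_combo) if cond_combo else "No condition matched"
--         response += f"\nMatched conditions: {cond_str}\n"
--         num = 1
--         for model in models:
--             response += f"{model}  "
--             if num % 3 == 0:
--                 response += f"\n"
--             else:
--                 response = response
--             num += 1
--     return response
--
-- def criteria_to_str(criteria):
--     parts = []
--     for op, val in criteria.items():
--         op_str = op_mapping.get(op, op)
--         parts.append(f"{op_str} {val}")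
--     return " and ".join(parts)
--
-- def condition_to_str(cond):
--     parts = []
--     for field, criteria in cond.items():
--         crit_str = criteria_to_str(criteria)
--         parts.append(f"{field} {crit_str}")
--     return ", ".join(parts)
-- ===== SOURCE B (Python) =====
-- # B: header/condition text built by join-over-comprehensions, and the per-combo
-- # model listing rendered by chunking models into rows of three instead of a
-- # per-element counter loop (newline only after a full row of three).
-- op_mapping = {
--     '$regex': 'contains',
--     '$gte': 'greater than or equal to',
--     '$gt': 'greater than',
--     '$lte': 'less than or equal to',
--     '$lt': 'less than',
--     '$ne': 'not equal to',
--     '$eq': 'equal to',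
--     '$in': 'in list',
--     '$nin': 'not in list',
--     '$exists': 'exists',
--     '$not': 'does not match condition',
-- }
--
--
-- def _criteria_text(criteria):
--     return " and ".join(f"{op_mapping.get(op, op)} {val}" for op, val in criteria.items())
--
--
-- def _condition_text(cond):
--     return ", ".join(f"{field} {_criteria_text(crit)}" for field, crit in cond.items())
--
--
-- def _model_rows(models):
--     text = ""
--     while models:
--         chunk, models = models[:3], models[3:]
--         text += "".join(f"{m}  " for m in chunk)
--         if len(chunk) == 3:
--             text += "\n"
--     return text
--
--
-- def clean_server_name(condition, data_list):
--     head = ("The following project models meet the specified criteria:\n"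
--             + "".join(f"Condition #{i}: {_condition_text(c)}\n"
--                       for i, c in enumerate(condition, 1))
--             + "Below are the machines that satisfy each condition combination:\n")
--     body = "".join(
--         "\nMatched conditions: "
--         + (" + ".join(combo) if combo else "No condition matched")
--         + "\n" + _model_rows(models)
--         for combo, models in sorted(data_list.items(), key=lambda x: (-len(x[0]), x[0])))
--     return head + body
-- ===== Notes on version B (the rewrite author's own statement) =====
-- stated objective: alternative
-- what changed: Header/condition/block strings are built by join-over-map comprehensions and the per-combo model listing is rendered by slicing models into chunks of three (newline appended only after a full chunk), replacing A's append-accumulator loops with a per-element counter and modulo test.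
import Mathlib
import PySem

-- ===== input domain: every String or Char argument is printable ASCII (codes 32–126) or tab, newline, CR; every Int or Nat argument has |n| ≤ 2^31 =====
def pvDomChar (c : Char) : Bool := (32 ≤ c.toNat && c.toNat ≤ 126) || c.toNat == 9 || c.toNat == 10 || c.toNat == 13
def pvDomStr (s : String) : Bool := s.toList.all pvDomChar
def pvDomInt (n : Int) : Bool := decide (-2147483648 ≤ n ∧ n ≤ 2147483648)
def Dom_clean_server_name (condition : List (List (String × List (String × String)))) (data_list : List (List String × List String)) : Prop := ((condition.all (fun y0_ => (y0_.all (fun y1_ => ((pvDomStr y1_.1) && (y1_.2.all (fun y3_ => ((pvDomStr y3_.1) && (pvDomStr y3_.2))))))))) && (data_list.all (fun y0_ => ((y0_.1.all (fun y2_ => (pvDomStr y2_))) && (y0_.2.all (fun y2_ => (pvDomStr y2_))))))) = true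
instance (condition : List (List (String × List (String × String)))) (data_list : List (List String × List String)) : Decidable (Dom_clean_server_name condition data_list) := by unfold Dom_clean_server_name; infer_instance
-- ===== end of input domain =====

-- B differs from A in decomposition: header/condition/block texts are built by join-over-map and
-- the per-combo model listing is rendered by chunking models into rows of three (newline only
-- after a full row), instead of A's append-accumulator loops with a per-element counter.

-- ===== PORT A =====
-- module-level op_mapping (shared constant data, used by both ports' helpers)
def pyOpMapping : PySem.Dict String String := PySem.Dict.ofList
  [("$regex", "contains"), ("$gte", "greater than or equal to"), ("$gt", "greater than"),
   ("$lte", "less than or equal to"), ("$lt", "less than"), ("$ne", "not equal to"),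
   ("$eq", "equal to"), ("$in", "in list"), ("$nin", "not in list"),
   ("$exists", "exists"), ("$not", "does not match condition")]

def criteria_to_str (criteria : List (String × String)) : String :=
  let parts : List String :=
    criteria.foldl (fun parts kv => parts ++ [PySem.Dict.getD pyOpMapping kv.1 kv.1 ++ " " ++ kv.2]) []
  PySem.Str.join " and " parts

def condition_to_str (cond : List (String × List (String × String))) : String :=
  let parts : List String :=
    cond.foldl (fun parts fc => parts ++ [fc.1 ++ " " ++ criteria_to_str fc.2]) []
  PySem.Str.join ", " parts

def clean_server_name (condition : List (List (String × List (String × String)))) (data_list : List (List String × List String)) : String :=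
  let response := "The following project models meet the specified criteria:\n"
  let response := (PySem.List.enumerate condition 1).foldl
    (fun r ic => r ++ "Condition #" ++ PySem.Int.toStr ic.1 ++ ": " ++ condition_to_str ic.2 ++ "\n") response
  let response := response ++ "Below are the machines that satisfy each condition combination:\n"
  (PySem.List.sorted2 data_list (fun x => -((x.1.length : Int))) (fun x => x.1)).foldl
    (fun r it =>
      let cond_str := if it.1.isEmpty then "No condition matched" else PySem.Str.join " + " it.1
      let r := r ++ "\nMatched conditions: " ++ cond_str ++ "\n"
      (it.2.foldl (fun (st : String × Int) m =>
          let r1 := st.1 ++ m ++ "  "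
          let r2 := if PySem.Int.mod st.2 3 = 0 then r1 ++ "\n" else r1
          (r2, st.2 + 1)) (r, (1 : Int))).1) response

-- ===== PORT B =====
def criteria_text_alt (criteria : List (String × String)) : String :=
  PySem.Str.join " and " (criteria.map (fun kv => PySem.Dict.getD pyOpMapping kv.1 kv.1 ++ " " ++ kv.2))

def condition_text_alt (cond : List (String × List (String × String))) : String :=
  PySem.Str.join ", " (cond.map (fun fc => fc.1 ++ " " ++ criteria_text_alt fc.2))

-- while models: chunk, models = models[:3], models[3:]; row text; '\n' only for a full chunk
def model_rows_alt : List String → String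
  | [] => ""
  | m :: rest =>
    let chunk := (m :: rest).take 3
    PySem.Str.join "" (chunk.map (fun x => x ++ "  "))
      ++ (if chunk.length = 3 then "\n" else "")
      ++ model_rows_alt (rest.drop 2)
  termination_by ms => ms.length
  decreasing_by simp

def clean_server_name_alt (condition : List (List (String × List (String × String)))) (data_list : List (List String × List String)) : String :=
  let head := "The following project models meet the specified criteria:\n"
    ++ PySem.Str.join "" ((PySem.List.enumerate condition 1).map
        (fun ic => "Condition #" ++ PySem.Int.toStr ic.1 ++ ": " ++ condition_text_alt ic.2 ++ "\n"))
    ++ "Below are the machines that satisfy each condition combination:\n"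
  let body := PySem.Str.join ""
    ((PySem.List.sorted2 data_list (fun x => -((x.1.length : Int))) (fun x => x.1)).map
      (fun it => "\nMatched conditions: "
        ++ (if it.1.isEmpty then "No condition matched" else PySem.Str.join " + " it.1)
        ++ "\n" ++ model_rows_alt it.2))
  head ++ body

-- ===== PRECONDITION & SPEC =====
def Spec_clean_server_name (condition : List (List (String × List (String × String)))) (data_list : List (List String × List String)) (out : String) : Prop := out = clean_server_name_alt condition data_list
instance (condition : List (List (String × List (String × String)))) (data_list : List (List String × List String)) (out : String) : Decidable (Spec_clean_server_name condition data_list out) := by unfold Spec_clean_server_name; infer_instance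

-- ===== CLAIM (what is proved, stated in full; the proofs are below) =====
def Claim_equal_clean_server_name : Prop := ∀ (condition : List (List (String × List (String × String)))) (data_list : List (List String × List String)), Dom_clean_server_name condition data_list → Spec_clean_server_name condition data_list (clean_server_name condition data_list)

-- ===== LEMMAS AND PROOFS =====

-- ''.join behaves as plain concatenation
theorem joinE_nil : PySem.Str.join "" ([] : List String) = "" := by
  apply String.toList_inj.mp
  simp [PySem.Str.toList_join, PySem.Chars.join_nil]

theorem joinE_cons (x : String) (xs : List String) :
    PySem.Str.join "" (x :: xs) = x ++ PySem.Str.join "" xs := by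
  apply String.toList_inj.mp
  cases xs with
  | nil => simp [PySem.Str.toList_join, PySem.Chars.join_singleton, PySem.Chars.join_nil]
  | cons y ys => simp [PySem.Str.toList_join, PySem.Chars.join_cons_cons]

-- an append-accumulating string fold is the ''.join of the mapped list
theorem foldl_append_eq_join {α : Type} (l : List α) (f : α → String) (r : String) :
    l.foldl (fun r x => r ++ f x) r = r ++ PySem.Str.join "" (l.map f) := by
  induction l generalizing r with
  | nil => simp [joinE_nil]
  | cons x xs ih => simp [joinE_cons, ih, String.append_assoc]

theorem crit_eq (criteria : List (String × String)) :
    criteria_to_str criteria = criteria_text_alt criteria := by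
  unfold criteria_to_str criteria_text_alt
  rw [PySem.List.foldl_append_singleton_eq_map]
  simp

theorem cond_eq (cond : List (String × List (String × String))) :
    condition_to_str cond = condition_text_alt cond := by
  unfold condition_to_str condition_text_alt
  rw [PySem.List.foldl_append_singleton_eq_map]
  simp [crit_eq]

-- A's counter loop over the models equals B's chunked rows, for any counter ≡ 1 (mod 3)
theorem rowsA_eq (ms : List String) (r : String) (n : Int) (h : PySem.Int.mod n 3 = 1) :
    (ms.foldl (fun (st : String × Int) m =>
        (if PySem.Int.mod st.2 3 = 0 then st.1 ++ m ++ "  " ++ "\n" else st.1 ++ m ++ "  ",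
         st.2 + 1)) (r, n)).1 = r ++ model_rows_alt ms := by
  rw [PySem.Int.mod_eq_emod_of_pos (by norm_num)] at h
  have h1 : ¬ PySem.Int.mod n 3 = 0 := by
    rw [PySem.Int.mod_eq_emod_of_pos (by norm_num)]; omega
  have h2 : ¬ PySem.Int.mod (n + 1) 3 = 0 := by
    rw [PySem.Int.mod_eq_emod_of_pos (by norm_num)]; omega
  have h3 : PySem.Int.mod (n + 1 + 1) 3 = 0 := by
    rw [PySem.Int.mod_eq_emod_of_pos (by norm_num)]; omega
  match ms with
  | [] => simp [model_rows_alt]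
  | [a] =>
    simp only [List.foldl_cons, List.foldl_nil, if_neg h1]
    simp [model_rows_alt, joinE_cons, joinE_nil, String.append_assoc]
  | [a, b] =>
    simp only [List.foldl_cons, List.foldl_nil, if_neg h1, if_neg h2]
    simp [model_rows_alt, joinE_cons, joinE_nil, String.append_assoc]
  | a :: b :: c :: t =>
    have ih := rowsA_eq t (r ++ a ++ "  " ++ b ++ "  " ++ c ++ "  " ++ "\n") (n + 1 + 1 + 1)
      (by rw [PySem.Int.mod_eq_emod_of_pos (by norm_num)]; omega)
    simp only [List.foldl_cons, if_neg h1, if_neg h2, if_pos h3]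
    rw [ih]
    simp [model_rows_alt, joinE_cons, joinE_nil, String.append_assoc]
  termination_by ms.length

-- ===== VERDICT (by name: the statement is the Claim_ definition above) =====
theorem clean_server_name_spec : Claim_equal_clean_server_name := by
  intro condition data_list _
  show clean_server_name condition data_list = clean_server_name_alt condition data_list
  simp only [clean_server_name, clean_server_name_alt]
  rw [PySem.List.foldl_congr_mem (PySem.List.enumerate condition 1) _
      (fun r ic => r ++ ("Condition #" ++ PySem.Int.toStr ic.1 ++ ": " ++ condition_text_alt ic.2 ++ "\n")) _
      (by intro acc x _; rw [cond_eq]; simp only [String.append_assoc])]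
  rw [foldl_append_eq_join]
  rw [PySem.List.foldl_congr_mem (PySem.List.sorted2 data_list (fun x => -((x.1.length : Int))) (fun x => x.1)) _
      (fun r it => r ++ ("\nMatched conditions: "
        ++ (if it.1.isEmpty then "No condition matched" else PySem.Str.join " + " it.1)
        ++ "\n" ++ model_rows_alt it.2)) _
      (by
        intro acc it _
        rw [rowsA_eq it.2 _ 1 (by decide)]
        simp only [String.append_assoc])]
  rw [foldl_append_eq_join]
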